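-- pv_equiv track=rewrite | github.com/DanielRM23/LeetCode-Problems-Solved | concatenationOfArray.py | getConcatenation3
-- ===== SOURCE A (Python) =====
-- def getConcatenation3(nums):
--     # We need to create a new array to store the new values
--     # It has to be the double size of nums
--     n = len(nums)
--     ans = [0] * 2 * n
--
--     # We use two variables to go over the array
--     i = 0
--     j = 0
--     while i < 2 * n:
--         # Copy the element
--         ans[i] = nums[j]
--         # Walk by the array
--         i += 1
--         j += 1
--         if j == n:  # If this happens, it's time to copy the array
--             j = 0
--
--     return ans
-- ===== SOURCE B (Python) =====
-- def getConcatenation3(nums):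
--     # Closed-form: the concatenation of the array with itself.
--     return nums + nums
-- ===== Notes on version B (the rewrite author's own statement) =====
-- stated objective: idiomatic
-- what changed: Replaces the pre-allocated buffer and the two-pointer wrapping copy loop by the closed-form expression nums + nums.
import Mathlib
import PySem

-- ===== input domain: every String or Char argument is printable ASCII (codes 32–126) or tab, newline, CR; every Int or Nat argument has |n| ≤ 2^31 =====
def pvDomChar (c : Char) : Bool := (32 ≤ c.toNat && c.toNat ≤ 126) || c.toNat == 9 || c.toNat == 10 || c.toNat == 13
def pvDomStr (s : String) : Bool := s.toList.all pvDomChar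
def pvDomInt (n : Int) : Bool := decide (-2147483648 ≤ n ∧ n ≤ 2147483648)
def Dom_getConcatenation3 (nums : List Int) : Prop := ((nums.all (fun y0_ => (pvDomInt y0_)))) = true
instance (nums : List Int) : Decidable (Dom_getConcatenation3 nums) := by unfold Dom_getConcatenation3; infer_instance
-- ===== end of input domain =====

-- B replaces A's pre-allocated buffer and two-pointer wrapping copy loop with the closed form nums ++ nums (idiomatic).

-- ===== PORT A =====
-- the while-loop of A: indices i, j are Python ints; ans[i] = nums[j] (i is always
-- nonnegative here, so .toNat is exact; nums[j] is always in range, getD 0 is never taken)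
def gcLoopA (nums : List Int) (n : Int) (i j : Int) (ans : List Int) : List Int :=
  if _h : i < 2 * n then
    let ans' := ans.set i.toNat ((PySem.List.pyGet? nums j).getD 0)
    let i' := i + 1
    let j' := j + 1
    gcLoopA nums n i' (if j' = n then 0 else j') ans'
  else ans
termination_by (2 * n - i).toNat
decreasing_by omega

def getConcatenation3 (nums : List Int) : List Int :=
  let n : Int := nums.length
  let ans : List Int := List.replicate (2 * n).toNat 0   -- [0] * 2 * n
  gcLoopA nums n 0 0 ans

-- ===== PORT B =====
def getConcatenation3_alt (nums : List Int) : List Int := nums ++ nums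

-- ===== PRECONDITION & SPEC =====
def Spec_getConcatenation3 (nums : List Int) (out : List Int) : Prop := out = getConcatenation3_alt nums
instance (nums : List Int) (out : List Int) : Decidable (Spec_getConcatenation3 nums out) := by unfold Spec_getConcatenation3; infer_instance

-- ===== CLAIM (what is proved, stated in full; the proofs are below) =====
def Claim_equal_getConcatenation3 : Prop := ∀ (nums : List Int), Dom_getConcatenation3 nums → Spec_getConcatenation3 nums (getConcatenation3 nums)

-- ===== LEMMAS AND PROOFS =====

lemma doubled_getElem (nums : List Int) (i : Nat) (hpos : 0 < nums.length)
    (hi : i < 2 * nums.length) :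
    (nums ++ nums)[i]'(by simp; omega) = nums[i % nums.length]'(Nat.mod_lt _ hpos) := by
  by_cases h : i < nums.length
  · rw [List.getElem_append_left h]
    congr 1
    exact (Nat.mod_eq_of_lt h).symm
  · rw [List.getElem_append_right (by omega)]
    congr 1
    rw [Nat.mod_eq_sub_mod (by omega), Nat.mod_eq_of_lt (by omega)]

lemma gcLoopA_eq (nums : List Int) (hpos : 0 < nums.length) :
    ∀ (k i : Nat), i + k = 2 * nums.length →
    ∀ ans : List Int, ans.length = 2 * nums.length →
    gcLoopA nums (nums.length : Int) (i : Int) ((i % nums.length : Nat) : Int) ans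
      = ans.take i ++ (nums ++ nums).drop i := by
  intro k
  induction k with
  | zero =>
    intro i hi ans hlen
    rw [gcLoopA]
    have hcond : ¬ ((i : Int) < 2 * (nums.length : Int)) := by omega
    rw [dif_neg hcond]
    rw [List.drop_eq_nil_of_le (by simp; omega), List.take_of_length_le (by omega),
      List.append_nil]
  | succ k ih =>
    intro i hi ans hlen
    rw [gcLoopA]
    have hcond : (i : Int) < 2 * (nums.length : Int) := by omega
    rw [dif_pos hcond]
    have hmod : i % nums.length < nums.length := Nat.mod_lt _ hpos
    have hget : (PySem.List.pyGet? nums ((i % nums.length : Nat) : Int)).getD 0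
        = nums[i % nums.length]'hmod := by
      rw [PySem.List.pyGet?_natCast, List.getElem?_eq_getElem hmod, Option.getD_some]
    have hmodsucc : (i + 1) % nums.length = (i % nums.length + 1) % nums.length := by
      conv_lhs => rw [Nat.add_mod]
      rcases Nat.lt_or_ge 1 nums.length with hgt | hle
      · rw [Nat.mod_eq_of_lt hgt]
      · have h1 : nums.length = 1 := by omega
        simp [h1]
    have hjs : (if ((i % nums.length : Nat) : Int) + 1 = (nums.length : Int) then (0 : Int)
        else ((i % nums.length : Nat) : Int) + 1) = (((i + 1) % nums.length : Nat) : Int) := by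
      by_cases h : i % nums.length + 1 = nums.length
      · rw [if_pos (by exact_mod_cast h)]
        rw [hmodsucc, h, Nat.mod_self]
        simp
      · rw [if_neg (by exact_mod_cast h)]
        have hlt2 : i % nums.length + 1 < nums.length := by omega
        rw [hmodsucc, Nat.mod_eq_of_lt hlt2]
        push_cast; ring
    have hi1 : ((i : Int) + 1) = ((i + 1 : Nat) : Int) := by push_cast; ring
    have htn : ((i : Int)).toNat = i := Int.toNat_natCast i
    simp only [hget, hjs, hi1, htn]
    rw [ih (i + 1) (by omega) _ (by simpa using hlen)]
    -- rewrite the take/drop around the set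
    have hset : (ans.set i (nums[i % nums.length]'hmod)).take (i + 1)
        = ans.take i ++ [nums[i % nums.length]'hmod] := by
      rw [List.set_eq_take_append_cons_drop, if_pos (by omega)]
      have hlt : (ans.take i).length = i := by simp; omega
      calc (ans.take i ++ nums[i % nums.length]'hmod :: ans.drop (i + 1)).take (i + 1)
          = (ans.take i ++ nums[i % nums.length]'hmod :: ans.drop (i + 1)).take
              ((ans.take i).length + 1) := by rw [hlt]
        _ = ans.take i ++ (nums[i % nums.length]'hmod :: ans.drop (i + 1)).take 1 := by
              rw [List.take_append]
              simp
        _ = ans.take i ++ [nums[i % nums.length]'hmod] := by simp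
    rw [hset]
    have hdrop : (nums ++ nums).drop i
        = nums[i % nums.length]'hmod :: (nums ++ nums).drop (i + 1) := by
      rw [List.drop_eq_getElem_cons (by simp; omega)]
      rw [doubled_getElem nums i hpos (by omega)]
    rw [hdrop, List.append_assoc, List.singleton_append]

-- ===== VERDICT (by name: the statement is the Claim_ definition above) =====
theorem getConcatenation3_spec : Claim_equal_getConcatenation3 := by
  intro nums _
  unfold Spec_getConcatenation3 getConcatenation3 getConcatenation3_alt
  rcases Nat.eq_zero_or_pos nums.length with h0 | hpos
  · have : nums = [] := List.eq_nil_of_length_eq_zero h0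
    subst this
    rw [gcLoopA]
    norm_num
  · have := gcLoopA_eq nums hpos (2 * nums.length) 0 (by omega)
      (List.replicate (2 * (nums.length : Int)).toNat 0)
      (by simp; omega)
    simpa using this
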